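-- pv_equiv track=rewrite | github.com/FanchenBao/leetcode | 2021_04_challenge/04_12_2021.py | constructArray
-- ===== SOURCE A (Python) =====
-- from typing import List
--
-- def constructArray(n: int, k: int) -> List[int]:
--     """LeetCode 667
--
--     The intuition is that we can always create k unique diffs in the
--     first k + 1 numbers. We construct the first k + 1 numbers like this:
--
--     1, k + 1, 2, k, 3, k - 1, 4, k - 2, 5, ...
--
--     Basically, we go 1, 2, 3, ... on all the even indices until index k.
--     We go k + 1, k, k - 1, k - 2, ... on all the odd indices until index k.
--
--     O(K), 44 ms, 86% ranking.
--     """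
--     res = list(range(1, n + 1))
--     p = 0
--     for i in range(0, k + 1, 2):
--         res[i] = p + 1
--         if i + 1 <= k:
--             res[i + 1] = k - p + 1
--         p += 1
--     return res
-- ===== SOURCE B (Python) =====
-- from typing import List
--
-- def constructArray(n: int, k: int) -> List[int]:
--     """Two-pointer construction: build the zigzag prefix by alternately
--     appending from the low end (starting at 1) and the high end (starting
--     at k+1) until the pointers cross, then continue counting upward to n."""
--     res = []
--     lo, hi = 1, k + 1
--     while lo <= hi:
--         res.append(lo)
--         lo += 1
--         if lo <= hi:
--             res.append(hi)
--             hi -= 1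
--     res.extend(range(len(res) + 1, n + 1))
--     return res
-- ===== Notes on version B (the rewrite author's own statement) =====
-- stated objective: alternative
-- what changed: A allocates 1..n and overwrites the first k+1 slots in an interleaved indexed loop; B never overwrites: it builds the zigzag prefix from scratch with two pointers (low starting at 1, high at k+1) appending alternately until they cross, then extends with the remaining ascending tail.
import Mathlib
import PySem

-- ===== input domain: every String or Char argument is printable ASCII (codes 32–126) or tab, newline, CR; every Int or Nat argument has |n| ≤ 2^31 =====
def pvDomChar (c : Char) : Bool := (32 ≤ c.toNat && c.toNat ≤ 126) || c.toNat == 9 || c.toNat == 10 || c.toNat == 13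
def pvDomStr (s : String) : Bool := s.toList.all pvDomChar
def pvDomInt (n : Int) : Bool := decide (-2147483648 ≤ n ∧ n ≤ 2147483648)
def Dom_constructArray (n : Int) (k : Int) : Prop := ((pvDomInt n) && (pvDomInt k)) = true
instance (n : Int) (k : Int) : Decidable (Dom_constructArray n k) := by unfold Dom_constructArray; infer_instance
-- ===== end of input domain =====

-- B builds the answer by a two-pointer append construction (no base array, no
-- index assignment) instead of A's overwrite-in-place loop (objective: alternative).

-- ===== PORT A =====
-- One loop step of A: res[i] = p + 1; if i + 1 <= k: res[i+1] = k - p + 1; p += 1.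
-- Index assignment res[i] = v is PySem.List.pySet? (none = IndexError, which Pre_ excludes).
def stepA (k : Int) (st : Option (List Int × Int)) (i : Int) : Option (List Int × Int) :=
  st.bind (fun rp =>
    (PySem.List.pySet? rp.1 i (rp.2 + 1)).bind (fun r1 =>
      (if i + 1 ≤ k then PySem.List.pySet? r1 (i + 1) (k - rp.2 + 1) else some r1).map
        (fun r2 => (r2, rp.2 + 1))))

def constructArray (n : Int) (k : Int) : List Int :=
  -- res = list(range(1, n + 1)); p = 0; for i in range(0, k + 1, 2): ...
  (((PySem.List.pyRange 0 (k + 1) 2).foldl (stepA k)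
      (some (PySem.List.pyRange 1 (n + 1) 1, 0))).map Prod.fst).getD []
  -- .getD [] is reached only when an assignment raised IndexError (outside Pre_)

-- ===== PORT B =====
-- while lo <= hi: res.append(lo); lo += 1; if lo <= hi: res.append(hi); hi -= 1
def zig (lo hi : Int) : List Int :=
  if lo ≤ hi then
    if lo + 1 ≤ hi then lo :: hi :: zig (lo + 1) (hi - 1) else [lo]
  else []
termination_by (hi + 1 - lo).toNat
decreasing_by omega

def constructArray_alt (n : Int) (k : Int) : List Int :=
  -- res = zigzag prefix; res.extend(range(len(res) + 1, n + 1))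
  let pre := zig 1 (k + 1)
  pre ++ PySem.List.pyRange ((pre.length : Int) + 1) (n + 1) 1

-- ===== PRECONDITION & SPEC =====
-- Exactly the inputs on which Python A returns: for k ≥ 0 the loop writes res[0..k],
-- raising IndexError unless k < n; for k < 0 the loop body never runs.
def Pre_constructArray (n : Int) (k : Int) : Prop := k < 0 ∨ k < n
instance (n : Int) (k : Int) : Decidable (Pre_constructArray n k) := by
  unfold Pre_constructArray; infer_instance

def pvWitness_constructArray : Int × Int := (6, 3)

def Spec_constructArray (n : Int) (k : Int) (out : List Int) : Prop := out = constructArray_alt n k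
instance (n : Int) (k : Int) (out : List Int) : Decidable (Spec_constructArray n k out) := by
  unfold Spec_constructArray; infer_instance

-- ===== CLAIM (what is proved, stated in full; the proofs are below) =====
def Claim_equal_constructArray : Prop := ∀ (n : Int) (k : Int), Dom_constructArray n k → Pre_constructArray n k → Spec_constructArray n k (constructArray n k)

-- ===== LEMMAS AND PROOFS =====

-- range(a, b, 2) structural lemmas
theorem pyRange_two_nil (a b : Int) (h : b ≤ a) : PySem.List.pyRange a b 2 = [] := by
  rw [PySem.List.pyRange_of_pos a b (by norm_num)]
  simp [show ¬ a < b by omega]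

theorem pyRange_two_cons (a b : Int) (h : a < b) :
    PySem.List.pyRange a b 2 = a :: PySem.List.pyRange (a + 2) b 2 := by
  rw [PySem.List.pyRange_of_pos a b (by norm_num),
      PySem.List.pyRange_of_pos (a + 2) b (by norm_num)]
  have hm : (if a < b then ((b - a + 2 - 1) / 2).toNat else 0)
      = (if a + 2 < b then ((b - (a + 2) + 2 - 1) / 2).toNat else 0) + 1 := by
    split_ifs <;> omega
  rw [hm, List.range_succ_eq_map]
  simp only [List.map_cons, List.map_map]
  congr 1
  · simp
  · apply List.map_congr_left
    intro x _
    simp only [Function.comp_apply]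
    omega

-- zig closed facts
theorem zig_nil (lo hi : Int) (h : hi < lo) : zig lo hi = [] := by
  rw [zig]; simp [show ¬ lo ≤ hi by omega]

theorem zig_length (lo hi : Int) : ((zig lo hi).length : Int) = max 0 (hi + 1 - lo) := by
  rw [zig]
  by_cases h1 : lo ≤ hi
  · by_cases h2 : lo + 1 ≤ hi
    · rw [if_pos h1, if_pos h2]
      have := zig_length (lo + 1) (hi - 1)
      simp only [List.length_cons]
      push_cast
      omega
    · rw [if_pos h1, if_neg h2]; simp; omega
  · rw [if_neg h1]; simp; omega
termination_by (hi + 1 - lo).toNat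
decreasing_by omega

-- writing at index done.length in done ++ x :: rest replaces x
theorem pySet?_append_cons (done : List Int) (x v : Int) (rest : List Int) :
    PySem.List.pySet? (done ++ x :: rest) ((done.length : Int)) v = some (done ++ v :: rest) := by
  rw [PySem.List.pySet?_natCast (done ++ x :: rest) done.length v (by simp)]
  congr 1
  induction done with
  | nil => rfl
  | cons d ds ih => simp [ih]

-- unfolding lemmas for zig, with the pointer updates written as the proof uses them
theorem zig_cons (lo hi : Int) (h : lo + 1 ≤ hi) :
    zig lo hi = lo :: hi :: zig (lo + 1) (hi - 1) := by
  rw [zig, if_pos (by omega : lo ≤ hi), if_pos h]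

theorem zig_single (lo hi : Int) (h1 : lo ≤ hi) (h2 : ¬ lo + 1 ≤ hi) :
    zig lo hi = [lo] := by
  rw [zig, if_pos h1, if_neg h2]

-- MAIN LEMMA: A's overwrite loop from even index i = 2p on a state whose first i
-- cells are already final equals B's two-pointer prefix zig (p+1) (k+1-p) followed
-- by the untouched ascending tail.
theorem mainA (k n : Int) (i p : Int) (hi0 : 0 ≤ i) (hip : i = 2 * p) (hkn : k < n)
    (done : List Int) (hd : (done.length : Int) = i) :
    ((PySem.List.pyRange i (k + 1) 2).foldl (stepA k)
        (some (done ++ PySem.List.pyRange (i + 1) (n + 1) 1, p))).map Prod.fst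
      = some (done ++ zig (p + 1) (k + 1 - p)
          ++ PySem.List.pyRange (max (i + 1) (k + 2)) (n + 1) 1) := by
  by_cases hik : i ≤ k
  · rw [pyRange_two_cons i (k + 1) (by omega), List.foldl_cons]
    rw [PySem.List.pyRange_one_cons (by omega : i + 1 < n + 1)]
    have hstep1 := pySet?_append_cons done (i + 1) (p + 1)
      (PySem.List.pyRange (i + 1 + 1) (n + 1) 1)
    rw [hd] at hstep1
    by_cases h2 : i + 1 ≤ k
    · -- second write at i + 1
      rw [PySem.List.pyRange_one_cons (by omega : i + 1 + 1 < n + 1)] at hstep1 ⊢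
      have hstep2 := pySet?_append_cons (done ++ [p + 1]) (i + 1 + 1) (k - p + 1)
        (PySem.List.pyRange (i + 1 + 1 + 1) (n + 1) 1)
      rw [show (((done ++ [p + 1]).length : Int)) = i + 1 by simp; omega] at hstep2
      rw [show done ++ [p + 1] ++ (i + 1 + 1) :: PySem.List.pyRange (i + 1 + 1 + 1) (n + 1) 1
            = done ++ (p + 1) :: (i + 1 + 1) :: PySem.List.pyRange (i + 1 + 1 + 1) (n + 1) 1
          by simp] at hstep2
      have hA : stepA k
          (some (done ++ (i + 1) :: (i + 1 + 1) :: PySem.List.pyRange (i + 1 + 1 + 1) (n + 1) 1, p)) i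
          = some ((done ++ [p + 1, k - p + 1]) ++ PySem.List.pyRange (i + 2 + 1) (n + 1) 1, p + 1) := by
        simp only [stepA, Option.bind_some, hstep1, if_pos h2, Option.bind_some, hstep2,
          Option.map_some]
        rw [show i + 2 + 1 = i + 1 + 1 + 1 by ring]
        simp
      rw [hA]
      rw [mainA k n (i + 2) (p + 1) (by omega) (by omega) hkn
        (done ++ [p + 1, k - p + 1]) (by simp [hd])]
      have hz : zig (p + 1) (k + 1 - p) = (p + 1) :: (k - p + 1) :: zig (p + 1 + 1) (k + 1 - (p + 1)) := by
      -- check pointer arithmetic: lo+1 = p+2, hi-1 = k-p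
        rw [zig_cons (p + 1) (k + 1 - p) (by omega)]
        rw [show k + 1 - p = k - p + 1 by ring, show k - p + 1 - 1 = k + 1 - (p + 1) by ring]
      rw [hz, show max (i + 2 + 1) (k + 2) = max (i + 1) (k + 2) by omega]
      simp
    · -- i = k: only one write, loop ends
      have hA : stepA k
          (some (done ++ (i + 1) :: PySem.List.pyRange (i + 1 + 1) (n + 1) 1, p)) i
          = some (done ++ (p + 1) :: PySem.List.pyRange (i + 1 + 1) (n + 1) 1, p + 1) := by
        simp only [stepA, Option.bind_some, hstep1, if_neg h2, Option.map_some]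
      rw [hA, pyRange_two_nil (i + 2) (k + 1) (by omega)]
      simp only [List.foldl_nil, Option.map_some]
      rw [zig_single (p + 1) (k + 1 - p) (by omega) (by omega),
        show max (i + 1) (k + 2) = i + 1 + 1 by omega]
      simp
  · rw [pyRange_two_nil i (k + 1) (by omega), zig_nil (p + 1) (k + 1 - p) (by omega),
      show max (i + 1) (k + 2) = i + 1 by omega]
    simp
termination_by (k + 1 - i).toNat
decreasing_by omega

-- ===== VERDICT (by name: the statement is the Claim_ definition above) =====
theorem constructArray_spec : Claim_equal_constructArray := by
  intro n k _ hpre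
  show constructArray n k = constructArray_alt n k
  unfold constructArray constructArray_alt
  by_cases hk : 0 ≤ k
  · have hkn : k < n := by
      rcases hpre with h | h
      · omega
      · exact h
    have h0 := mainA k n 0 0 (by norm_num) (by norm_num) hkn [] (by simp)
    rw [show (0 : Int) + 1 = 1 by norm_num, show k + 1 - 0 = k + 1 by ring,
      List.nil_append, List.nil_append] at h0
    rw [h0]
    have hlen : ((zig 1 (k + 1)).length : Int) + 1 = k + 2 := by
      have := zig_length 1 (k + 1); omega
    rw [show max 1 (k + 2) = k + 2 by omega]
    simp [hlen]
  · rw [pyRange_two_nil 0 (k + 1) (by omega), zig_nil 1 (k + 1) (by omega)]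
    simp
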